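-- pv_equiv track=rewrite | github.com/JackGammack/CS-313E-Assignments | BabyNames.py | getmorepop
-- ===== SOURCE A (Python) =====
-- def rankings(dict,name):
--     if( name in dict ):
--         return dict[name]
--     return 0
--
-- def alldecades(dict):
--     alldec = []
--     for key in dict:
--         decades = rankings(dict,key)
--         add = True
--         for item in decades:
--             if ( item==1001 ):
--                 add = False
--         if( add ):
--             alldec.append(key)
--     return alldec
--
-- def getmorepop(dict):
--     morepop = []
--     nms = alldecades(dict)
--     for item in nms:
--         rnks = rankings(dict,item)
--         if( sorted(rnks, reverse=True) == rnks ):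
--             morepop.append(item)
--     return morepop
-- ===== SOURCE B (Python) =====
-- def getmorepop(dict):
--     morepop = []
--     for name, rnks in dict.items():
--         if 1001 not in rnks and all(a >= b for a, b in zip(rnks, rnks[1:])):
--             morepop.append(name)
--     return morepop
-- ===== Notes on version B (the rewrite author's own statement) =====
-- stated objective: simpler
-- what changed: One fused pass over dict.items() replacing the alldecades pre-pass plus repeated lookups, with the sort-and-compare descending test replaced by a linear adjacent-pair scan.
import Mathlib
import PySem

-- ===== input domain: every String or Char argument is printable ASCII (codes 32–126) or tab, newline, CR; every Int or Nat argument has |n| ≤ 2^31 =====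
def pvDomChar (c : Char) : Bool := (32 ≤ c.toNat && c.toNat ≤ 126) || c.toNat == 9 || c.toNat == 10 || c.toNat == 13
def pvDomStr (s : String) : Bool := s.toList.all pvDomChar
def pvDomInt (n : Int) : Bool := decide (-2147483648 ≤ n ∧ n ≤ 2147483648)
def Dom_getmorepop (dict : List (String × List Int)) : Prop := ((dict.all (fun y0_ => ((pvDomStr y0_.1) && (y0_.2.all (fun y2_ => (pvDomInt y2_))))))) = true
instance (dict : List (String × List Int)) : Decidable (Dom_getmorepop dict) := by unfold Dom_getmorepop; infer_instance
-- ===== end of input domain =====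

-- B fuses A's alldecades pre-pass and descending check into one pass over the items and
-- replaces sorted(rnks, reverse=True) == rnks by a linear adjacent-pair scan (objective: simpler).

-- ===== PORT A =====
-- rankings: Python returns the int 0 when name is absent, but every call site passes a key of
-- the dict, so that branch is unreachable; [] stands in for it to keep the List Int type.
def pvRankings (dict : List (String × List Int)) (name : String) : List Int :=
  if (PySem.Dict.mk dict).contains name then (PySem.Dict.mk dict).getD name [] else []

def pvAlldecades (dict : List (String × List Int)) : List String :=
  (dict.map Prod.fst).foldl (fun alldec key =>
    let decades := pvRankings dict key
    let add := decades.foldl (fun a item => if item = 1001 then false else a) true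
    if add then alldec ++ [key] else alldec) []

def getmorepop (dict : List (String × List Int)) : List String :=
  (pvAlldecades dict).foldl (fun morepop item =>
    let rnks := pvRankings dict item
    if PySem.List.sorted rnks (fun x => x) true = rnks then morepop ++ [item] else morepop) []

-- ===== PORT B =====
def getmorepop_alt (dict : List (String × List Int)) : List String :=
  dict.foldl (fun morepop p =>
    if (!(p.2.contains 1001)) &&
       ((p.2.zip (PySem.List.slice p.2 (some 1) none)).all (fun q => decide (q.2 ≤ q.1)))
    then morepop ++ [p.1] else morepop) []

-- ===== PRECONDITION & SPEC =====
-- Pre_ excludes association lists with duplicate keys: a Python dict cannot contain a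
-- duplicate key, so such lists do not encode any input the Python programs ever receive.
def Pre_getmorepop (dict : List (String × List Int)) : Prop := (dict.map Prod.fst).Nodup
instance (dict : List (String × List Int)) : Decidable (Pre_getmorepop dict) := by unfold Pre_getmorepop; infer_instance
def pvWitness_getmorepop : (List (String × List Int)) := [("ann", [3, 2, 2]), ("bob", [1001, 1]), ("cal", [1, 2])]

def Spec_getmorepop (dict : List (String × List Int)) (out : List String) : Prop := out = getmorepop_alt dict
instance (dict : List (String × List Int)) (out : List String) : Decidable (Spec_getmorepop dict out) := by unfold Spec_getmorepop; infer_instance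

-- ===== CLAIM (what is proved, stated in full; the proofs are below) =====
def Claim_equal_getmorepop : Prop := ∀ (dict : List (String × List Int)), Dom_getmorepop dict → Pre_getmorepop dict → Spec_getmorepop dict (getmorepop dict)

-- ===== LEMMAS AND PROOFS =====

-- A's inner sentinel loop computes "1001 does not occur".
theorem pv_foldl_sentinel (l : List Int) (b : Bool) :
    l.foldl (fun a item => if item = 1001 then false else a) b = (b && !(l.contains 1001)) := by
  induction l generalizing b with
  | nil => simp
  | cons x t ih =>
    simp only [List.foldl_cons, List.contains_cons, ih]
    by_cases h : x = 1001
    · cases b <;> simp [h]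
    · cases b <;> simp [h]; exact fun _ e => h e.symm

-- the adjacent-pair scan is exactly Pairwise (· ≥ ·)
theorem pv_zip_tail_all (l : List Int) :
    ((l.zip l.tail).all (fun q => decide (q.2 ≤ q.1)) = true) ↔ l.Pairwise (fun a b => b ≤ a) := by
  rw [← List.isChain_iff_pairwise]
  induction l with
  | nil => simp
  | cons x t ih =>
    cases t with
    | nil => simp
    | cons y u => simp [List.isChain_cons_cons, ← ih]

-- the Python descending test: sorted(rnks, reverse=True) == rnks ↔ non-increasing
theorem pv_sorted_rev_eq_iff (l : List Int) :
    PySem.List.sorted l (fun x => x) true = l ↔ l.Pairwise (fun a b => b ≤ a) := by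
  constructor
  · intro h
    have := PySem.List.sorted_pairwise_rev (xs := l) (key := fun x => x)
    rwa [h] at this
  · intro h
    exact PySem.List.sorted_rev_eq_self_of_pairwise l (fun x => x) h

-- under unique keys, the lookup on a key of the list returns that pair's value
theorem pv_rankings_mem (dict : List (String × List Int)) (p : String × List Int)
    (hnd : (dict.map Prod.fst).Nodup) (hp : p ∈ dict) : pvRankings dict p.1 = p.2 := by
  have hkeys : (PySem.Dict.mk dict).keys = dict.map Prod.fst := by
    simp [PySem.Dict.keys]
  have hnd' : (PySem.Dict.mk dict).keys.Nodup := by rw [hkeys]; exact hnd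
  have hitems : (p.1, p.2) ∈ (PySem.Dict.mk dict).items := by simpa [PySem.Dict.items] using hp
  have hget : (PySem.Dict.mk dict).get? p.1 = some p.2 :=
    PySem.Dict.get?_of_mem_items (PySem.Dict.mk dict) hitems hnd'
  have hcont : (PySem.Dict.mk dict).contains p.1 = true := by
    rw [PySem.Dict.contains_eq_isSome_get?, hget]; rfl
  simp [pvRankings, hcont, PySem.Dict.getD_eq_get?_getD, hget]

-- ===== VERDICT (by name: the statement is the Claim_ definition above) =====

theorem getmorepop_spec : Claim_equal_getmorepop := by
  intro dict _ hpre
  unfold Spec_getmorepop getmorepop pvAlldecades getmorepop_alt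
  simp only [pv_foldl_sentinel, Bool.true_and, PySem.List.slice_from_one]
  rw [PySem.List.foldl_append_if_eq_filter, PySem.List.foldl_append_ite_eq_filter]
  rw [PySem.List.foldl_append_if (p := fun p : String × List Int =>
        (!(p.2.contains 1001)) && ((p.2.zip p.2.tail).all (fun q => decide (q.2 ≤ q.1))))
      (f := Prod.fst)]
  simp only [List.nil_append, List.filter_filter, List.filter_map]
  congr 1
  apply List.filter_congr
  intro p hp
  have hr := pv_rankings_mem dict p hpre hp
  simp only [Function.comp, hr]
  rw [Bool.and_comm]
  congr 1
  rw [Bool.eq_iff_iff, decide_eq_true_iff, pv_sorted_rev_eq_iff, ← pv_zip_tail_all]
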